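-- pv_equiv track=rewrite | github.com/DeibyArizac/OAM | oam_encoder.py | symbols_from_bits
-- ===== SOURCE A (Python) =====
-- def symbols_from_bits(bits, modes_per_symbol: int):
--     """
--     Segmenta flujo de bits en bloques de modes_per_symbol.
--
--     Parametros:
--         bits: Lista de bits.
--         modes_per_symbol: Numero de bits por simbolo.
--
--     Retorna:
--         Lista de simbolos, cada simbolo es lista de bits.
--
--     Notas:
--         - Rellena con ceros si el ultimo simbolo es incompleto.
--     """
--     symbols = []
--     for i in range(0, len(bits), modes_per_symbol):
--         symbol_bits = bits[i:i+modes_per_symbol]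
--         # Rellenar con ceros si es incompleto
--         while len(symbol_bits) < modes_per_symbol:
--             symbol_bits.append(0)
--         symbols.append(symbol_bits)
--     return symbols
-- ===== SOURCE B (Python) =====
-- def symbols_from_bits(bits, modes_per_symbol: int):
--     # Streaming pass: accumulate bits one by one into the current symbol and
--     # flush it when full; pad and flush the trailing partial symbol at the end.
--     if modes_per_symbol <= 0:
--         return []
--     symbols = []
--     current = []
--     for b in bits:
--         current.append(b)
--         if len(current) == modes_per_symbol:
--             symbols.append(current)
--             current = []
--     if current:
--         current.extend([0] * (modes_per_symbol - len(current)))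
--         symbols.append(current)
--     return symbols
-- ===== Notes on version B (the rewrite author's own statement) =====
-- stated objective: alternative
-- what changed: B replaces A's index-stride slicing (range + slice + per-chunk padding while-loop) with a single element-by-element streaming pass that accumulates bits into a current symbol, flushes it when full, and pads only the trailing partial symbol once at the end.
import Mathlib
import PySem

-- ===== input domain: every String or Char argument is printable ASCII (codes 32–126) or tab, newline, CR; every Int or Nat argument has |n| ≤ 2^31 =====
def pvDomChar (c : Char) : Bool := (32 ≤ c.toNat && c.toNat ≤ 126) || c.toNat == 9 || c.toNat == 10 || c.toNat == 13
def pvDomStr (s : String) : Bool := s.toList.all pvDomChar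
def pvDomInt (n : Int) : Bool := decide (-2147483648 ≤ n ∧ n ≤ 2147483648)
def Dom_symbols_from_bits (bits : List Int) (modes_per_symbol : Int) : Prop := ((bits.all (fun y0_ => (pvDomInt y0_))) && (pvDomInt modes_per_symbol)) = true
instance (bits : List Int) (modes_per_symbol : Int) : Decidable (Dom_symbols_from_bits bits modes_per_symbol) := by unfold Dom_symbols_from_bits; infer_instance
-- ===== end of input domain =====

-- B streams the bits one by one into an accumulator symbol (flush when full, pad
-- the trailing partial symbol once) instead of A's range/slice chunking with a
-- per-chunk padding while-loop; objective: alternative (same O(n) cost).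


-- ===== PORT A =====
-- the 'while len(symbol_bits) < modes_per_symbol: symbol_bits.append(0)' loop
def padWhile (l : List Int) (m : Int) : List Int :=
  if (l.length : Int) < m then padWhile (l ++ [0]) m else l
termination_by (m - l.length).toNat
decreasing_by simp; omega

def symbols_from_bits (bits : List Int) (modes_per_symbol : Int) : List (List Int) :=
  (PySem.List.pyRange 0 bits.length modes_per_symbol).foldl
    (fun symbols i =>
      symbols ++ [padWhile (PySem.List.slice bits (some i) (some (i + modes_per_symbol))) modes_per_symbol])
    []

-- ===== PORT B =====
def symbols_from_bits_alt (bits : List Int) (modes_per_symbol : Int) : List (List Int) :=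
  if modes_per_symbol ≤ 0 then []
  else
    let st := bits.foldl
      (fun (st : List (List Int) × List Int) b =>
        let cur := st.2 ++ [b]
        if (cur.length : Int) = modes_per_symbol then (st.1 ++ [cur], []) else (st.1, cur))
      ([], [])
    if st.2 ≠ [] then
      st.1 ++ [st.2 ++ List.replicate (modes_per_symbol - st.2.length).toNat 0]
    else st.1

-- ===== PRECONDITION & SPEC =====
-- Pre_ excludes exactly modes_per_symbol = 0, where the Python A raises ValueError (range step 0).
def Pre_symbols_from_bits (bits : List Int) (modes_per_symbol : Int) : Prop := modes_per_symbol ≠ 0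
instance (bits : List Int) (modes_per_symbol : Int) : Decidable (Pre_symbols_from_bits bits modes_per_symbol) := by unfold Pre_symbols_from_bits; infer_instance
def pvWitness_symbols_from_bits : List Int × Int := ([1, 0, 1, 1, 0], 3)

def Spec_symbols_from_bits (bits : List Int) (modes_per_symbol : Int) (out : List (List Int)) : Prop := out = symbols_from_bits_alt bits modes_per_symbol
instance (bits : List Int) (modes_per_symbol : Int) (out : List (List Int)) : Decidable (Spec_symbols_from_bits bits modes_per_symbol out) := by unfold Spec_symbols_from_bits; infer_instance

-- ===== CLAIM (what is proved, stated in full; the proofs are below) =====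
def Claim_equal_symbols_from_bits : Prop := ∀ (bits : List Int) (modes_per_symbol : Int), Dom_symbols_from_bits bits modes_per_symbol → Pre_symbols_from_bits bits modes_per_symbol → Spec_symbols_from_bits bits modes_per_symbol (symbols_from_bits bits modes_per_symbol)

-- ===== LEMMAS AND PROOFS =====

-- reference chunking both ports are reduced to
def chunks (M : Nat) (xs : List Int) : List (List Int) :=
  if h : M = 0 ∨ xs = [] then []
  else (xs.take M ++ List.replicate (M - xs.length) 0) :: chunks M (xs.drop M)
termination_by xs.length
decreasing_by
  rw [not_or] at h
  have h1 : 0 < M := Nat.pos_of_ne_zero h.1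
  have h2 : xs.length ≠ 0 := by
    intro hl
    exact h.2 (List.eq_nil_of_length_eq_zero hl)
  simp
  omega

theorem padWhile_eq (l : List Int) (m : Int) :
    padWhile l m = l ++ List.replicate (m.toNat - l.length) 0 := by
  rw [padWhile]
  split
  · rename_i h
    rw [padWhile_eq (l ++ [0]) m]
    simp only [List.append_assoc, List.length_append, List.length_singleton]
    congr 1
    have h1 : l.length + 1 ≤ m.toNat := by omega
    have : m.toNat - l.length = (m.toNat - (l.length + 1)) + 1 := by omega
    rw [this, List.replicate_succ]
    rfl
  · rename_i h
    have : m.toNat - l.length = 0 := by omega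
    simp [this]
termination_by (m - l.length).toNat
decreasing_by simp; omega

theorem foldl_append_singleton (f : Int → List Int) (l : List Int) (acc : List (List Int)) :
    l.foldl (fun s i => s ++ [f i]) acc = acc ++ l.map f := by
  induction l generalizing acc with
  | nil => simp
  | cons x xs ih => simp [List.foldl_cons, ih]

theorem pyRange_pos_step (m L : Int) (hm : 0 < m) (hL : 0 < L) :
    PySem.List.pyRange 0 L m = 0 :: (PySem.List.pyRange 0 (L - m) m).map (· + m) := by
  rw [PySem.List.pyRange_of_pos 0 L hm, PySem.List.pyRange_of_pos 0 (L - m) hm]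
  have hdiv : (L - 0 + m - 1) / m = (L - m - 0 + m - 1) / m + 1 := by
    have h := Int.add_mul_ediv_right (L - m - 0 + m - 1) 1 (by omega : m ≠ 0)
    have he : L - m - 0 + m - 1 + 1 * m = L - 0 + m - 1 := by ring
    rw [he] at h
    omega
  have hc : (if (0:Int) < L then ((L - 0 + m - 1) / m).toNat else 0)
      = (if (0:Int) < L - m then ((L - m - 0 + m - 1) / m).toNat else 0) + 1 := by
    rw [if_pos hL]
    split
    · rename_i h2
      have h3 : 0 ≤ (L - m - 0 + m - 1) / m := Int.ediv_nonneg (by omega) (by omega)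
      omega
    · rename_i h2
      have h4 : (L - m - 0 + m - 1) / m = 0 :=
        Int.ediv_eq_zero_of_lt (by omega) (by omega)
      omega
  rw [hc, List.range_succ_eq_map]
  simp only [List.map_cons, List.map_map]
  congr 1
  · simp
  · apply List.map_congr_left
    intro k _
    simp [Function.comp]
    push_cast
    ring

theorem pyRange_neg_nil (L m : Int) (hm : m < 0) (hL : 0 ≤ L) :
    PySem.List.pyRange 0 L m = [] := by
  unfold PySem.List.pyRange
  rw [if_neg (by omega : ¬ m = 0)]
  rw [if_neg (by omega : ¬ 0 < m), if_neg (by omega : ¬ L < 0)]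
  simp

theorem pyRange_pos_nil (L m : Int) (hm : 0 < m) (hL : L ≤ 0) :
    PySem.List.pyRange 0 L m = [] := by
  rw [PySem.List.pyRange_of_pos 0 L hm, if_neg (by omega : ¬ (0:Int) < L)]
  simp

-- chunk-level identity for A's side
theorem A_eq_chunks (m : Int) (hm : 0 < m) (xs : List Int) :
    (PySem.List.pyRange 0 xs.length m).map
      (fun i => padWhile (PySem.List.slice xs (some i) (some (i + m))) m)
      = chunks m.toNat xs := by
  rcases Nat.eq_zero_or_pos xs.length with h0 | hpos
  · have : xs = [] := List.eq_nil_of_length_eq_zero h0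
    subst this
    rw [chunks.eq_def]
    simp [PySem.List.pyRange]
  · rw [pyRange_pos_step m xs.length hm (by exact_mod_cast hpos)]
    rw [chunks.eq_def]
    have hne : ¬ (m.toNat = 0 ∨ xs = []) := by
      push_neg
      exact ⟨by omega, by intro h; subst h; simp at hpos⟩
    rw [dif_neg hne]
    simp only [List.map_cons, List.map_map]
    congr 1
    · -- head chunk
      rw [padWhile_eq]
      have : PySem.List.slice xs (some 0) (some (0 + m)) = xs.take m.toNat := by
        rw [PySem.List.slice_zero_start, zero_add, PySem.List.slice_to xs (by omega : (0:Int) ≤ m)]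
      rw [this]
      congr 1
      simp
      omega
    · -- tail chunks
      have hshift : ∀ i ∈ PySem.List.pyRange 0 (xs.length - m) m,
          PySem.List.slice xs (some (i + m)) (some (i + m + m))
            = PySem.List.slice (xs.drop m.toNat) (some i) (some (i + m)) := by
        intro i hi
        have hi0 : 0 ≤ i := by
          rw [PySem.List.pyRange_of_pos 0 _ hm] at hi
          simp at hi
          obtain ⟨k, _, hk⟩ := hi
          have : (0:Int) ≤ (k:Int) := Int.natCast_nonneg k
          nlinarith
        rw [PySem.List.slice_toNat xs (a := i+m) (b := i+m+m) (by omega) (by omega),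
            PySem.List.slice_toNat (xs.drop m.toNat) (a := i) (b := i+m) (by omega) (by omega)]
        rw [List.drop_drop]
        congr 1
        · omega
        · congr 1
          omega
      calc (PySem.List.pyRange 0 (xs.length - m) m).map
            (fun i => padWhile (PySem.List.slice xs (some (i + m)) (some (i + m + m))) m)
          = (PySem.List.pyRange 0 (xs.length - m) m).map
            (fun i => padWhile (PySem.List.slice (xs.drop m.toNat) (some i) (some (i + m))) m) := by
            apply List.map_congr_left
            intro i hi
            rw [hshift i hi]
        _ = chunks m.toNat (xs.drop m.toNat) := by
            by_cases hle : m ≤ (xs.length : Int)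
            · have hlen : ((xs.drop m.toNat).length : Int) = xs.length - m := by
                rw [List.length_drop]
                omega
              rw [← hlen]
              exact A_eq_chunks m hm (xs.drop m.toNat)
            · have hd : xs.drop m.toNat = [] := List.drop_eq_nil_of_le (by omega)
              rw [hd, pyRange_pos_nil (xs.length - m) m hm (by omega), chunks.eq_def]
              simp
termination_by xs.length
decreasing_by simp; omega

-- B's streaming fold (with the final flush) computes the same chunking
theorem stream_eq_chunks (m : Int) (hm : 0 < m) (xs cur : List Int)
    (syms : List (List Int)) (hcur : cur.length < m.toNat) :
    (let st := xs.foldl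
        (fun (st : List (List Int) × List Int) b =>
          let cur := st.2 ++ [b]
          if (cur.length : Int) = m then (st.1 ++ [cur], []) else (st.1, cur))
        (syms, cur)
     if st.2 ≠ [] then st.1 ++ [st.2 ++ List.replicate (m - st.2.length).toNat 0] else st.1)
      = syms ++ chunks m.toNat (cur ++ xs) := by
  induction xs generalizing cur syms with
  | nil =>
    rcases eq_or_ne cur [] with h | h
    · subst h
      rw [chunks.eq_def]
      simp
    · simp only [List.foldl_nil, List.append_nil, if_pos h]
      rw [chunks.eq_def]
      have hne : ¬ (m.toNat = 0 ∨ cur = []) := by push_neg; exact ⟨by omega, h⟩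
      rw [dif_neg hne]
      have h1 : cur.take m.toNat = cur := List.take_of_length_le (by omega)
      have h2 : cur.drop m.toNat = [] := List.drop_eq_nil_of_le (by omega)
      rw [h1, h2, chunks.eq_def]
      have h3 : (m - (cur.length : Int)).toNat = m.toNat - cur.length := by omega
      simp [h3]
  | cons b rest ih =>
    simp only [List.foldl_cons]
    by_cases hfull : ((cur ++ [b]).length : Int) = m
    · rw [if_pos hfull]
      have hcur' : ([] : List Int).length < m.toNat := by simp; omega
      have := ih [] (syms ++ [cur ++ [b]]) hcur'
      simp only [List.nil_append] at this
      rw [this]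
      have hlen : (cur ++ [b]).length = m.toNat := by simp at hfull ⊢; omega
      have hne : ¬ (m.toNat = 0 ∨ (cur ++ [b]) ++ rest = []) := by
        push_neg
        exact ⟨by omega, by simp⟩
      have hchunks : chunks m.toNat ((cur ++ [b]) ++ rest) = (cur ++ [b]) :: chunks m.toNat rest := by
        rw [chunks.eq_def, dif_neg hne, ← hlen, List.take_left, List.drop_left]
        have hz : (cur ++ [b]).length - ((cur ++ [b]) ++ rest).length = 0 := by simp
        rw [hz]
        simp
      have hsplit : cur ++ b :: rest = (cur ++ [b]) ++ rest := by simp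
      rw [hsplit, hchunks]
      simp
    · rw [if_neg hfull]
      have hcur' : (cur ++ [b]).length < m.toNat := by
        simp at hfull ⊢
        omega
      have := ih (cur ++ [b]) syms hcur'
      rw [this]
      congr 2
      simp

-- ===== VERDICT (by name: the statement is the Claim_ definition above) =====
theorem symbols_from_bits_spec : Claim_equal_symbols_from_bits := by
  intro bits m _hdom hpre
  unfold Spec_symbols_from_bits symbols_from_bits symbols_from_bits_alt
  rcases lt_or_gt_of_ne hpre with hneg | hpos
  · -- negative step: A's range is empty, B's guard returns []
    rw [pyRange_neg_nil _ m hneg (by exact_mod_cast Nat.zero_le _)]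
    simp [hneg.le]
  · rw [if_neg (by omega : ¬ m ≤ 0)]
    rw [foldl_append_singleton]
    simp only [List.nil_append]
    rw [A_eq_chunks m hpos bits]
    have := stream_eq_chunks m hpos bits [] [] (by simp; omega)
    simp only [List.nil_append] at this
    rw [this]
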